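-- pv_equiv track=rewrite | github.com/ae-gorithm/arnold | week19/PG258712.py | solution
-- ===== SOURCE A (Python) =====
-- from collections import defaultdict
-- from itertools import combinations
--
-- def indexing(friends):
--     fri = defaultdict(int)
--     for i in range(len(friends)):
--         fri[friends[i]] = i
--
--     return fri
--
-- def compareWeight(a, b, giftWeight, friendIndexed, nextMonth):
--     a = friendIndexed[a]
--     b = friendIndexed[b]
--     if giftWeight[a] > giftWeight[b]:
--         nextMonth[a] += 1
--     elif giftWeight[a] < giftWeight[b]:
--         nextMonth[b] += 1
--
--     return nextMonth
--
-- def solution(friends, gifts):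
--     answer = 0
--     friendIndexed = indexing(friends)
--     n = len(friends)
--     giftWeight = [0 for _ in range(n)]
--     comb = combinations(friends, 2)
--     nextMonth = [0 for _ in range(n)]
--     history = defaultdict(int)
--
--     for g in gifts:
--         a, b = g.split()
--         giftWeight[friendIndexed[a]] += 1
--         giftWeight[friendIndexed[b]] -= 1
--         history[g] += 1
--
--     key = history.keys()
--
--     for a, b in comb:
--         s1 = a + " " + b
--         s2 = b + " " + a
--
--         if s1 in key or s2 in key:
--             if history[s1] > history[s2]:
--                 nextMonth[friendIndexed[a]] += 1
--             elif history[s1] < history[s2]: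
--                 nextMonth[friendIndexed[b]] += 1
--             else:
--                 nextMonth = compareWeight(a, b, giftWeight, friendIndexed, nextMonth)
--         else:
--             nextMonth = compareWeight(a, b, giftWeight, friendIndexed, nextMonth)
--
--     return max(nextMonth)
-- ===== SOURCE B (Python) =====
-- from collections import Counter
--
-- def solution(friends, gifts):
--     n = len(friends)
--     pos = {f: i for i, f in enumerate(friends)}
--     weight = [0] * n
--     pair_count = Counter()
--     for g in gifts:
--         a, b = g.split()
--         i, j = pos.get(a, 0), pos.get(b, 0)
--         weight[i] += 1
--         weight[j] -= 1
--         pair_count[(i, j)] += 1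
--     # rank by weight: each friend starts with one point per strictly lighter friend
--     cnt = Counter(weight)
--     smaller, acc = {}, 0
--     for v in sorted(cnt):
--         smaller[v] = acc
--         acc += cnt[v]
--     next_month = [smaller[v] for v in weight]
--     # correct the pairs whose gift counts are unequal: the gift winner, not the
--     # weight winner, takes that pair's point
--     for i, j in pair_count:
--         if i == j:
--             continue
--         if i > j and (j, i) in pair_count:
--             continue
--         cij, cji = pair_count[(i, j)], pair_count[(j, i)]
--         if cij == cji:
--             continue
--         if weight[i] > weight[j]:
--             next_month[i] -= 1
--         elif weight[j] > weight[i]: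
--             next_month[j] -= 1
--         next_month[i if cij > cji else j] += 1
--     return max(next_month)
-- ===== Notes on version B (the rewrite author's own statement) =====
-- stated objective: faster
-- what changed: A decides every one of the O(n^2) friend pairs by building both gift strings and looking them up in the history dict; B instead ranks all friends at once by sorting the weight multiset (base points = number of strictly lighter friends) and then corrects only the pairs that actually occur in the gift history, keyed by index pairs.
-- outside the precondition, e.g. on solution(['a', 'b', 'a', 'b'], ['b b', 'a b', 'a b', 'b a', 'b b']): A returns 4, B returns 3; on solution(['a', 'b'], ['a  b', 'b a']): A returns 1, B returns 0; on solution(['a', 'b'], ['b c', 'a b']): A returns 1, B returns 0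
import Mathlib
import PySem

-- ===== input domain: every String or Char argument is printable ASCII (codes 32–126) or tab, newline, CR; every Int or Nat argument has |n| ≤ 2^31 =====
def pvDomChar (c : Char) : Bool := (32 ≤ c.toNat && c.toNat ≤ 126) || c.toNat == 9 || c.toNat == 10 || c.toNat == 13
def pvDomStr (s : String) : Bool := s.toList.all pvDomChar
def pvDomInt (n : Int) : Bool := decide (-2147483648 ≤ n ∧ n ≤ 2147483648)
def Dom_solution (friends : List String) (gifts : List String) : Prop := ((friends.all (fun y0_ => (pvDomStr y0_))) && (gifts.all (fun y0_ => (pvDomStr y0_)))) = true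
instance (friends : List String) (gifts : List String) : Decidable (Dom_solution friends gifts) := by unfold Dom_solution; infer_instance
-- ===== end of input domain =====

-- B replaces A's O(n^2) loop over all pairs of friends by a sort-based weight
-- ranking plus corrections only for the pairs that actually appear in the
-- gift history (objective: faster).

-- ===== PORT A =====
-- literal transliteration of Source A.  pyGetD/pySetD stand for Python's
-- giftWeight[..] reads/writes (in range on every input admitted by Pre_);
-- the defaultdict's insert-on-read of history[s1]/history[s2] is not modelled:
-- under Pre_ each unordered pair is visited once, so the inserted zero entries
-- are never read again and the returned value is unchanged.

def pvIndexing (friends : List String) : PySem.Dict String Int :=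
  (PySem.List.pyRange 0 (PySem.List.len friends) 1).foldl
    (fun fri i => fri.insert (PySem.List.pyGetD friends i "") i) PySem.Dict.empty

def pvCompareWeight (a b : String) (giftWeight : List Int)
    (friendIndexed : PySem.Dict String Int) (nextMonth : List Int) : List Int :=
  let a' := friendIndexed.getD a 0
  let b' := friendIndexed.getD b 0
  if PySem.List.pyGetD giftWeight a' 0 > PySem.List.pyGetD giftWeight b' 0 then
    PySem.List.pySetD nextMonth a' (PySem.List.pyGetD nextMonth a' 0 + 1)
  else if PySem.List.pyGetD giftWeight a' 0 < PySem.List.pyGetD giftWeight b' 0 then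
    PySem.List.pySetD nextMonth b' (PySem.List.pyGetD nextMonth b' 0 + 1)
  else nextMonth

-- body of A's "for g in gifts" loop; the fallback arm is Python's ValueError
-- on unpacking (unreachable under Pre_)
def pvGiftsLoopA (friendIndexed : PySem.Dict String Int)
    (st : List Int × PySem.Dict String Int) (g : String) :
    List Int × PySem.Dict String Int :=
  match PySem.Str.split₀ g with
  | [a, b] =>
      let gw := PySem.List.pySetD st.1 (friendIndexed.getD a 0)
        (PySem.List.pyGetD st.1 (friendIndexed.getD a 0) 0 + 1)
      let gw := PySem.List.pySetD gw (friendIndexed.getD b 0)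
        (PySem.List.pyGetD gw (friendIndexed.getD b 0) 0 - 1)
      (gw, st.2.modify g 0 (· + 1))
  | _ => st

-- body of A's "for a, b in comb" loop (combinations always yields pairs)
def pvPairLoopA (friendIndexed : PySem.Dict String Int) (giftWeight : List Int)
    (history : PySem.Dict String Int) (nextMonth : List Int) (p : List String) : List Int :=
  match p with
  | [a, b] =>
      let s1 := a ++ " " ++ b
      let s2 := b ++ " " ++ a
      if history.contains s1 || history.contains s2 then
        if history.getD s1 0 > history.getD s2 0 then
          PySem.List.pySetD nextMonth (friendIndexed.getD a 0)
            (PySem.List.pyGetD nextMonth (friendIndexed.getD a 0) 0 + 1)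
        else if history.getD s1 0 < history.getD s2 0 then
          PySem.List.pySetD nextMonth (friendIndexed.getD b 0)
            (PySem.List.pyGetD nextMonth (friendIndexed.getD b 0) 0 + 1)
        else pvCompareWeight a b giftWeight friendIndexed nextMonth
      else pvCompareWeight a b giftWeight friendIndexed nextMonth
  | _ => nextMonth

def solution (friends : List String) (gifts : List String) : Int :=
  let friendIndexed := pvIndexing friends
  let n := friends.length
  let giftWeight : List Int := List.replicate n 0
  let comb := PySem.List.combinations friends 2
  let nextMonth : List Int := List.replicate n 0
  let st := gifts.foldl (pvGiftsLoopA friendIndexed) (giftWeight, PySem.Dict.empty)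
  let nextMonth := comb.foldl (pvPairLoopA friendIndexed st.1 st.2) nextMonth
  (PySem.List.max? nextMonth (fun x => x)).getD 0   -- max([]) raises: outside Pre_

-- ===== PORT B =====
-- literal transliteration of Source B

def pvPos (friends : List String) : PySem.Dict String Int :=
  (PySem.List.enumerate friends).foldl (fun d p => d.insert p.2 p.1) PySem.Dict.empty

-- body of B's "for g in gifts" loop (fallback = ValueError, unreachable under Pre_)
def pvGiftsLoopB (pos : PySem.Dict String Int)
    (st : List Int × PySem.Dict (Int × Int) Int) (g : String) :
    List Int × PySem.Dict (Int × Int) Int :=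
  match PySem.Str.split₀ g with
  | [a, b] =>
      let i := pos.getD a 0
      let j := pos.getD b 0
      let w := PySem.List.pySetD st.1 i (PySem.List.pyGetD st.1 i 0 + 1)
      let w := PySem.List.pySetD w j (PySem.List.pyGetD w j 0 - 1)
      (w, st.2.modify (i, j) 0 (· + 1))
  | _ => st

-- "for v in sorted(cnt): smaller[v] = acc; acc += cnt[v]"
def pvRank (weight : List Int) : PySem.Dict Int Int :=
  let cnt := PySem.Dict.counter weight
  ((PySem.List.sorted cnt.keys (fun v => v) false).foldl
      (fun st v => (st.1.insert v st.2, st.2 + cnt.getD v 0)) (PySem.Dict.empty, 0)).1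

-- body of B's correction loop over the keys of pair_count
def pvCorrect (weight : List Int) (pc : PySem.Dict (Int × Int) Int)
    (nm : List Int) (p : Int × Int) : List Int :=
  if p.1 = p.2 then nm
  else if p.1 > p.2 ∧ pc.contains (p.2, p.1) = true then nm
  else
    let cij := pc.getD (p.1, p.2) 0
    let cji := pc.getD (p.2, p.1) 0
    if cij = cji then nm
    else
      let nm :=
        if PySem.List.pyGetD weight p.1 0 > PySem.List.pyGetD weight p.2 0 then
          PySem.List.pySetD nm p.1 (PySem.List.pyGetD nm p.1 0 - 1)
        else if PySem.List.pyGetD weight p.2 0 > PySem.List.pyGetD weight p.1 0 then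
          PySem.List.pySetD nm p.2 (PySem.List.pyGetD nm p.2 0 - 1)
        else nm
      let k := if cij > cji then p.1 else p.2
      PySem.List.pySetD nm k (PySem.List.pyGetD nm k 0 + 1)

def solution_alt (friends : List String) (gifts : List String) : Int :=
  let n := friends.length
  let pos := pvPos friends
  let st := gifts.foldl (pvGiftsLoopB pos) ((List.replicate n 0 : List Int), PySem.Dict.empty)
  let weight := st.1
  let pc := st.2
  let smaller := pvRank weight
  let nextMonth := weight.map (fun v => smaller.getD v 0)  -- smaller[v]: v is always a key
  let nextMonth := pc.keys.foldl (pvCorrect weight pc) nextMonth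
  (PySem.List.max? nextMonth (fun x => x)).getD 0   -- max([]) raises: outside Pre_

-- ===== PRECONDITION & SPEC =====
-- a usable name: non-empty and without whitespace (so str.split is its inverse)
abbrev pvGood (f : String) : Prop :=
  f.toList ≠ [] ∧ (f.toList.all (fun c => !PySem.Chars.isspace c)) = true

-- Pre_ is the problem's natural domain: at least one friend, distinct names,
-- and every gift literally "giver receiver" where both tokens are friends with
-- non-empty whitespace-free names.  It excludes (a) inputs where A raises
-- (no friends / a gift that does not split into two tokens) and (b) corners
-- where A's value is an accident of its implementation: duplicate friend
-- names (A's last-index aliasing double-counts pairs), gift strings that are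
-- not in single-space canonical form, and gift tokens that are not friends
-- (A's defaultdict silently aliases them to index 0).
def Pre_solution (friends : List String) (gifts : List String) : Prop :=
  friends ≠ [] ∧ friends.Nodup ∧
  (∀ g ∈ gifts, ∃ a ∈ friends, ∃ b ∈ friends, g = a ++ " " ++ b ∧ pvGood a ∧ pvGood b)
instance (friends : List String) (gifts : List String) : Decidable (Pre_solution friends gifts) := by
  unfold Pre_solution; infer_instance

def pvWitness_solution : List String × List String :=
  (["muzi", "ryan", "frodo"], ["muzi ryan", "ryan frodo", "muzi frodo", "ryan muzi"])

def Spec_solution (friends : List String) (gifts : List String) (out : Int) : Prop :=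
  out = solution_alt friends gifts
instance (friends : List String) (gifts : List String) (out : Int) : Decidable (Spec_solution friends gifts out) := by
  unfold Spec_solution; infer_instance

-- ===== CLAIM (what is proved, stated in full; the proofs are below) =====
def Claim_equal_solution : Prop := ∀ (friends : List String) (gifts : List String), Dom_solution friends gifts → Pre_solution friends gifts → Spec_solution friends gifts (solution friends gifts)

-- ===== LEMMAS AND PROOFS =====

-- ---- proof-level abbreviations ----

lemma pvNoWs (f : String) (h : (f.toList.all (fun c => !PySem.Chars.isspace c)) = true) :
    ∀ c ∈ f.toList, PySem.Chars.isspace c = false := by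
  intro c hc
  have := List.all_eq_true.1 h c hc
  simpa using this

def pvF (friends : List String) (i : Nat) : String := friends.getD i ""

def pvStr (friends : List String) (i j : Nat) : String :=
  pvF friends i ++ " " ++ pvF friends j

def pvC (friends gifts : List String) (i j : Nat) : Nat :=
  gifts.count (pvStr friends i j)

-- the shared per-gift weight update (first component of both gift loops)
def pvWStep (D : PySem.Dict String Int) (gw : List Int) (g : String) : List Int :=
  match PySem.Str.split₀ g with
  | [a, b] =>
      let gw := PySem.List.pySetD gw (D.getD a 0) (PySem.List.pyGetD gw (D.getD a 0) 0 + 1)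
      PySem.List.pySetD gw (D.getD b 0) (PySem.List.pyGetD gw (D.getD b 0) 0 - 1)
  | _ => gw

def pvW (friends gifts : List String) : List Int :=
  gifts.foldl (pvWStep (pvIndexing friends)) (List.replicate friends.length 0)

def pvWv (friends gifts : List String) (k : Nat) : Int := (pvW friends gifts).getD k 0

def pvKeyIdx (friends : List String) (g : String) : Int × Int :=
  match PySem.Str.split₀ g with
  | [a, b] => ((pvIndexing friends).getD a 0, (pvIndexing friends).getD b 0)
  | _ => (0, 0)

def pvPcD (friends gifts : List String) : PySem.Dict (Int × Int) Int :=
  (gifts.map (pvKeyIdx friends)).foldl (fun d p => d.modify p 0 (· + 1)) PySem.Dict.empty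

-- weight decision for the pair (i, j), gift decision, their 0/1 sums
def pvDecW (friends gifts : List String) (i j : Nat) : Option Nat :=
  if pvWv friends gifts i > pvWv friends gifts j then some i
  else if pvWv friends gifts j > pvWv friends gifts i then some j
  else none

def pvDec (friends gifts : List String) (i j : Nat) : Option Nat :=
  if pvC friends gifts i j = pvC friends gifts j i then pvDecW friends gifts i j
  else some (if pvC friends gifts i j > pvC friends gifts j i then i else j)

def pvDA (friends gifts : List String) (q : Nat × Nat) (k : Nat) : Int :=
  if pvDec friends gifts q.1 q.2 = some k then 1 else 0

def pvDW (friends gifts : List String) (q : Nat × Nat) (k : Nat) : Int :=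
  if pvDecW friends gifts q.1 q.2 = some k then 1 else 0

def pvDD (friends gifts : List String) (q : Nat × Nat) (k : Nat) : Int :=
  pvDA friends gifts q k - pvDW friends gifts q k

def pvCanon (p : Int × Int) : Nat × Nat :=
  if p.1 ≤ p.2 then (p.1.toNat, p.2.toNat) else (p.2.toNat, p.1.toNat)

abbrev pvSkip (friends gifts : List String) (p : Int × Int) : Prop :=
  p.1 = p.2 ∨ (p.1 > p.2 ∧ (pvPcD friends gifts).contains (p.2, p.1) = true) ∨
    (pvPcD friends gifts).getD (p.1, p.2) 0 = (pvPcD friends gifts).getD (p.2, p.1) 0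

def pvDB (friends gifts : List String) (p : Int × Int) (k : Nat) : Int :=
  if pvSkip friends gifts p then 0 else pvDD friends gifts (pvCanon p) k

-- ordered pair list: pvPairsOf l = the unordered pairs of l in combinations order
def pvPairsOf {α : Type} : List α → List (α × α)
  | [] => []
  | x :: xs => xs.map (fun y => (x, y)) ++ pvPairsOf xs

def pvBump (nm : List Int) (o : Option Nat) : List Int :=
  match o with
  | none => nm
  | some k => PySem.List.pySetD nm (k : Int) (PySem.List.pyGetD nm (k : Int) 0 + 1)




lemma pvPairsOf_map {α β : Type} (f : α → β) (l : List α) :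
    pvPairsOf (l.map f) = (pvPairsOf l).map (fun p => (f p.1, f p.2)) := by
  induction l with
  | nil => rfl
  | cons x xs ih => simp [pvPairsOf, ih, List.map_map]

lemma mem_pvPairsOf_range (n : Nat) (q : Nat × Nat) :
    q ∈ pvPairsOf (List.range n) ↔ q.1 < q.2 ∧ q.2 < n := by
  induction n generalizing q with
  | zero => simp [pvPairsOf]
  | succ m ih =>
      rw [List.range_succ_eq_map, pvPairsOf, pvPairsOf_map]
      simp only [List.mem_append, List.mem_map, List.mem_range]
      constructor
      · rintro (⟨y, ⟨y', hy', rfl⟩, rfl⟩ | ⟨p, hp, rfl⟩)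
        · simp; omega
        · have := (ih p).1 hp
          simp; omega
      · rintro ⟨h1, h2⟩
        rcases q with ⟨a, b⟩
        simp only at h1 h2
        cases a with
        | zero =>
            left
            exact ⟨b, ⟨b - 1, by omega, by omega⟩, rfl⟩
        | succ a' =>
            right
            refine ⟨(a', b - 1), (ih _).2 ⟨by omega, by omega⟩, ?_⟩
            simp [Prod.ext_iff]; omega
lemma nodup_pvPairsOf_range (n : Nat) : (pvPairsOf (List.range n)).Nodup := by
  induction n with
  | zero => simp [pvPairsOf]
  | succ m ih =>
      rw [List.range_succ_eq_map, pvPairsOf, pvPairsOf_map]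
      refine List.Nodup.append ?_ ?_ ?_
      · exact ((List.nodup_range).map (fun a b h => by omega)).map
          (fun a b h => by simpa using h)
      · exact ih.map (fun p q h => by
          rcases p with ⟨a,b⟩; rcases q with ⟨c,d⟩
          simp only [Prod.mk.injEq] at h
          simp [Prod.ext_iff]; omega)
      · intro q hq hq'
        rcases List.mem_map.1 hq with ⟨y, _, rfl⟩
        rcases List.mem_map.1 hq' with ⟨p, _, h⟩
        simp only [Prod.mk.injEq] at h
        omega
lemma pvCombinations_two {α : Type} (l : List α) :
    PySem.List.combinations l 2 = (pvPairsOf l).map (fun p => [p.1, p.2]) := by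
  induction l with
  | nil => rfl
  | cons x xs ih =>
      rw [show (2 : Nat) = 1 + 1 from rfl, PySem.List.combinations_cons_succ,
        PySem.List.combinations_one, ih]
      simp [pvPairsOf, List.map_map]


lemma pvGoNonspace (a : List Char) (rest cur acc)
    (ha : ∀ c ∈ a, PySem.Chars.isspace c = false) :
    PySem.Chars.split₀.go (a ++ rest) cur acc = PySem.Chars.split₀.go rest (a.reverse ++ cur) acc := by
  induction a generalizing cur with
  | nil => simp
  | cons c a' ih =>
      rw [List.cons_append, PySem.Chars.split₀.go, ha c (by simp)]
      simp only [Bool.false_eq_true, if_false]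
      rw [ih _ (fun d hd => ha d (List.mem_cons_of_mem _ hd))]
      simp

lemma pvCharsSplit (a b : List Char) (ha : a ≠ []) (hb : b ≠ [])
    (ha' : ∀ c ∈ a, PySem.Chars.isspace c = false)
    (hb' : ∀ c ∈ b, PySem.Chars.isspace c = false) :
    PySem.Chars.split₀ (a ++ ' ' :: b) = [a, b] := by
  unfold PySem.Chars.split₀
  rw [pvGoNonspace a _ _ _ ha', PySem.Chars.split₀.go]
  rw [show PySem.Chars.isspace ' ' = true from rfl]
  simp only [if_true, List.append_nil]
  rw [if_neg (by simp [ha])]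
  rw [show PySem.Chars.split₀.go b [] [a.reverse.reverse] =
      PySem.Chars.split₀.go (b ++ []) [] [a.reverse.reverse] by simp]
  rw [pvGoNonspace b _ _ _ hb', PySem.Chars.split₀.go]
  rw [if_neg (by simp [hb])]
  simp

lemma pvSplit_concat (a b : String) (ha : a.toList ≠ []) (hb : b.toList ≠ [])
    (ha' : ∀ c ∈ a.toList, PySem.Chars.isspace c = false)
    (hb' : ∀ c ∈ b.toList, PySem.Chars.isspace c = false) :
    PySem.Str.split₀ (a ++ " " ++ b) = [a, b] := by
  have h1 : (a ++ " " ++ b).toList = a.toList ++ ' ' :: b.toList := by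
    simp [String.toList_append]
  have h2 : List.map String.toList (PySem.Str.split₀ (a ++ " " ++ b)) =
      [a.toList, b.toList] := by
    rw [PySem.Str.split₀_map_toList, h1, pvCharsSplit _ _ ha hb ha' hb']
  rcases hs : PySem.Str.split₀ (a ++ " " ++ b) with _ | ⟨x, _ | ⟨y, _ | _⟩⟩ <;>
    rw [hs] at h2 <;> simp at h2
  rw [← String.toList_inj.mp h2.1, ← String.toList_inj.mp h2.2]

lemma pvIdx_spec (friends : List String) (hnd : friends.Nodup) (i : Nat)
    (hi : i < friends.length) :
    (pvIndexing friends).getD (pvF friends i) 0 = (i : Int) := by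
  have hmap : (PySem.List.pyRange 0 (PySem.List.len friends) 1).map
      (fun j => PySem.List.pyGetD friends j "") = friends :=
    PySem.List.map_pyGetD_pyRange_zero friends ""
  have hitems := PySem.Dict.items_foldl_insert_fresh
      (PySem.List.pyRange 0 (PySem.List.len friends) 1)
      (fun j => PySem.List.pyGetD friends j "") (fun j => j) PySem.Dict.empty
      (fun a _ => PySem.Dict.contains_empty _)
      (by rw [hmap]; exact hnd)
  have hkeys : (pvIndexing friends).keys.Nodup := by
    have : (pvIndexing friends).keys = friends := by
      simp only [PySem.Dict.keys, pvIndexing, hitems]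
      rw [show (PySem.Dict.empty : PySem.Dict String Int).items = [] from rfl]
      simp only [List.nil_append, List.map_map]
      rw [show ((fun p => p.1) ∘ fun a => (PySem.List.pyGetD friends a "", a)) =
        (fun j => PySem.List.pyGetD friends j "") from rfl, hmap]
    rw [this]; exact hnd
  have hmem : (pvF friends i, (i : Int)) ∈ (pvIndexing friends).items := by
    simp only [pvIndexing, hitems]
    rw [show (PySem.Dict.empty : PySem.Dict String Int).items = [] from rfl, List.nil_append]
    refine List.mem_map.2 ⟨(i : Int), ?_, ?_⟩
    · rw [PySem.List.mem_pyRange_one]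
      constructor
      · exact Int.natCast_nonneg i
      · rw [PySem.List.len_eq]; exact_mod_cast hi
    · simp [pvF]
  rw [PySem.Dict.getD_eq_get?_getD, PySem.Dict.get?_of_mem_items _ hmem hkeys]
  rfl


lemma pvPos_eq (friends : List String) : pvPos friends = pvIndexing friends := by
  unfold pvPos pvIndexing
  rw [PySem.List.enumerate_eq_map_pyRange friends "", List.foldl_map]

def pvHStepA (d : PySem.Dict String Int) (g : String) : PySem.Dict String Int :=
  match PySem.Str.split₀ g with
  | [_, _] => d.modify g 0 (· + 1)
  | _ => d

def pvPcStepB (D : PySem.Dict String Int) (d : PySem.Dict (Int × Int) Int) (g : String) :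
    PySem.Dict (Int × Int) Int :=
  match PySem.Str.split₀ g with
  | [a, b] => d.modify (D.getD a 0, D.getD b 0) 0 (· + 1)
  | _ => d

lemma pvGiftsLoopA_eq (D : PySem.Dict String Int) :
    pvGiftsLoopA D = fun st g => (pvWStep D st.1 g, pvHStepA st.2 g) := by
  funext st g
  unfold pvGiftsLoopA pvWStep pvHStepA
  rcases h : PySem.Str.split₀ g with _ | ⟨a, _ | ⟨b, _ | _⟩⟩ <;> simp [h]

lemma pvGiftsLoopB_eq (D : PySem.Dict String Int) :
    pvGiftsLoopB D = fun st g => (pvWStep D st.1 g, pvPcStepB D st.2 g) := by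
  funext st g
  unfold pvGiftsLoopB pvWStep pvPcStepB
  rcases h : PySem.Str.split₀ g with _ | ⟨a, _ | ⟨b, _ | _⟩⟩ <;> simp [h]

lemma pvGiftsA_split (friends gifts : List String) :
    gifts.foldl (pvGiftsLoopA (pvIndexing friends))
        ((List.replicate friends.length 0 : List Int), PySem.Dict.empty) =
      (pvW friends gifts, gifts.foldl pvHStepA PySem.Dict.empty) := by
  rw [pvGiftsLoopA_eq, PySem.List.foldl_prod_mk]
  rfl

lemma pvGiftsB_split (friends gifts : List String) :
    gifts.foldl (pvGiftsLoopB (pvPos friends))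
        ((List.replicate friends.length 0 : List Int), PySem.Dict.empty) =
      (pvW friends gifts, gifts.foldl (pvPcStepB (pvIndexing friends)) PySem.Dict.empty) := by
  rw [pvPos_eq, pvGiftsLoopB_eq, PySem.List.foldl_prod_mk]
  rfl

-- under Pre_, every gift splits into two tokens
lemma pvPreSplit (friends gifts : List String) (h : Pre_solution friends gifts) :
    ∀ g ∈ gifts, ∃ a ∈ friends, ∃ b ∈ friends,
      g = a ++ " " ++ b ∧ pvGood a ∧ pvGood b ∧ PySem.Str.split₀ g = [a, b] := by
  intro g hg
  obtain ⟨-, -, hgs⟩ := h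
  obtain ⟨a, ha, b, hb, rfl, ga, gb⟩ := hgs g hg
  exact ⟨a, ha, b, hb, rfl, ga, gb,
    pvSplit_concat a b ga.1 gb.1 (pvNoWs a ga.2) (pvNoWs b gb.2)⟩

lemma pvHistA_eq (friends gifts : List String) (h : Pre_solution friends gifts) :
    gifts.foldl pvHStepA PySem.Dict.empty =
      gifts.foldl (fun d g => d.modify g 0 (· + 1)) PySem.Dict.empty := by
  apply PySem.List.foldl_congr_mem
  intro d g hg
  obtain ⟨a, -, b, -, -, -, -, hs⟩ := pvPreSplit friends gifts h g hg
  unfold pvHStepA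
  rw [hs]

lemma pvPcB_eq (friends gifts : List String) (h : Pre_solution friends gifts) :
    gifts.foldl (pvPcStepB (pvIndexing friends)) PySem.Dict.empty = pvPcD friends gifts := by
  unfold pvPcD
  rw [List.foldl_map]
  apply PySem.List.foldl_congr_mem
  intro d g hg
  obtain ⟨a, -, b, -, -, -, -, hs⟩ := pvPreSplit friends gifts h g hg
  unfold pvPcStepB pvKeyIdx
  rw [hs]

lemma pvW_length (friends gifts : List String) :
    (pvW friends gifts).length = friends.length := by
  unfold pvW
  have : ∀ (l : List String) (w : List Int),
      (l.foldl (pvWStep (pvIndexing friends)) w).length = w.length := by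
    intro l
    induction l with
    | nil => intro w; rfl
    | cons g gs ih =>
        intro w
        rw [List.foldl_cons, ih]
        unfold pvWStep
        rcases h : PySem.Str.split₀ g with _ | ⟨a, _ | ⟨b, _ | _⟩⟩ <;>
          simp [h, PySem.List.length_pySetD]
  rw [this, List.length_replicate]


lemma pvSumFilter {α : Type} (l : List α) (p : α → Bool) (f : α → Int)
    (h : ∀ x ∈ l, p x = false → f x = 0) :
    (l.map f).sum = ((l.filter p).map f).sum := by
  induction l with
  | nil => rfl
  | cons x xs ih =>
      by_cases hx : p x = true
      · simp [List.filter_cons, hx, ih (fun y hy => h y (by simp [hy]))]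
      · simp only [Bool.not_eq_true] at hx
        simp [List.filter_cons, hx, h x (by simp) hx,
          ih (fun y hy => h y (by simp [hy]))]

lemma pvSumZero {α : Type} (l : List α) (f : α → Int) (h : ∀ x ∈ l, f x = 0) :
    (l.map f).sum = 0 := by
  induction l with
  | nil => rfl
  | cons x xs ih => simp [h x (by simp), ih (fun y hy => h y (by simp [hy]))]

lemma pvFoldPoint {α : Type} (n : Nat) (body : List Int → α → List Int) (δ : α → Nat → Int)
    (L : List α) :
    ∀ (hb : ∀ nm x, x ∈ L → nm.length = n →
        (body nm x).length = n ∧ ∀ k, k < n → (body nm x).getD k 0 = nm.getD k 0 + δ x k)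
      (nm : List Int), nm.length = n →
      (L.foldl body nm).length = n ∧
      ∀ k, k < n → (L.foldl body nm).getD k 0 = nm.getD k 0 + (L.map (fun x => δ x k)).sum := by
  induction L with
  | nil => intro hb nm h; simpa using h
  | cons x xs ih =>
      intro hb nm h
      have hx := hb nm x (by simp) h
      have ih' := ih (fun nm y hy => hb nm y (by simp [hy])) (body nm x) hx.1
      refine ⟨ih'.1, fun k hk => ?_⟩
      rw [List.foldl_cons, ih'.2 k hk, hx.2 k hk]
      simp [add_assoc]


lemma pvRankFold_notmem (cnt : PySem.Dict Int Int) (vs : List Int) :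
    ∀ (d : PySem.Dict Int Int) (acc : Int) (v0 : Int), v0 ∉ vs →
      ((vs.foldl (fun st v => (st.1.insert v st.2, st.2 + cnt.getD v 0)) (d, acc)).1).getD v0 0 =
        d.getD v0 0 := by
  induction vs with
  | nil => intro d acc v0 _; rfl
  | cons v vs' ih =>
      intro d acc v0 hv0
      rw [List.foldl_cons]
      dsimp only
      rw [ih _ _ _ (fun h => hv0 (List.mem_cons_of_mem _ h)), PySem.Dict.getD_insert,
        if_neg (fun h => hv0 (by rw [h]; exact List.mem_cons_self ..))]

lemma pvCountSplit (w : List Int) (v : Int) (vs' : List Int) (hv : v ∉ vs') :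
    w.countP (fun x => decide (x ∉ vs')) =
      w.countP (fun x => decide (x ∉ v :: vs')) + w.count v := by
  induction w with
  | nil => rfl
  | cons x xs ih =>
      rw [List.countP_cons, List.countP_cons, List.count_cons, ih]
      by_cases hxv : x = v
      · subst hxv; simp [hv]; omega
      · by_cases hx2 : x ∈ vs' <;> simp [hxv, hx2] <;> omega

lemma pvRankFold_main (w : List Int) (vs : List Int) :
    ∀ (d : PySem.Dict Int Int) (acc : Int),
      vs.Pairwise (· < ·) →
      (∀ x ∈ w, x ∉ vs → ∀ u ∈ vs, x < u) →
      acc = (w.countP (fun x => decide (x ∉ vs)) : Int) →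
      ∀ v0 ∈ vs,
        ((vs.foldl (fun st v => (st.1.insert v st.2, st.2 + (PySem.Dict.counter w).getD v 0))
            (d, acc)).1).getD v0 0 =
          (w.countP (fun x => decide (x < v0)) : Int) := by
  induction vs with
  | nil => intro d acc _ _ _ v0 hv0; simp at hv0
  | cons v vs' ih =>
      intro d acc hpw hall hacc v0 hv0
      have hhead : ∀ u ∈ vs', v < u := fun u hu => (List.pairwise_cons.1 hpw).1 u hu
      have hvns : v ∉ vs' := fun h => lt_irrefl v (hhead v h)
      rcases List.mem_cons.1 hv0 with rfl | hv0'
      · rw [List.foldl_cons]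
        dsimp only
        rw [pvRankFold_notmem _ _ _ _ _ hvns, PySem.Dict.getD_insert, if_pos rfl, hacc]
        have hc : List.countP (fun x => decide (x ∉ v0 :: vs')) w =
            List.countP (fun x => decide (x < v0)) w := by
          apply List.countP_congr
          intro x hx
          by_cases hlt : x < v0
          · have hnm : x ∉ v0 :: vs' := by
              intro hmem
              rcases List.mem_cons.1 hmem with rfl | h
              · exact lt_irrefl x hlt
              · exact absurd (hhead x h) (by omega)
            simp [hnm, hlt]
          · have hm : x ∈ v0 :: vs' := by
              by_contra hnm
              exact hlt (hall x hx hnm v0 (List.mem_cons_self ..))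
            simp [hm, hlt]
        rw [hc]
      · rw [List.foldl_cons]
        dsimp only
        apply ih _ _ (List.pairwise_cons.1 hpw).2 ?_ ?_ v0 hv0'
        · intro x hx hxn u hu
          by_cases hxv : x = v
          · subst hxv; exact hhead u hu
          · exact hall x hx (by simp [hxv, hxn]) u (List.mem_cons_of_mem _ hu)
        · rw [PySem.Dict.getD_counter, hacc, ← Nat.cast_add, ← pvCountSplit w v vs' hvns]

lemma pvRank_spec (w : List Int) (v : Int) (hv : v ∈ w) :
    (pvRank w).getD v 0 = (w.countP (fun x => decide (x < v)) : Int) := by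
  unfold pvRank
  have hkeys : (PySem.Dict.counter w).keys = PySem.Set.ofList w := PySem.Dict.keys_counter w
  have hpw : (PySem.List.sorted ((PySem.Dict.counter w).keys) (fun v => v) false).Pairwise (· < ·) := by
    rw [hkeys]; exact PySem.List.sorted_ofList_pairwise_lt w
  have hmem : ∀ x, x ∈ PySem.List.sorted ((PySem.Dict.counter w).keys) (fun v => v) false ↔ x ∈ w := by
    intro x
    rw [PySem.List.mem_sorted, hkeys, PySem.Set.mem_ofList]
  apply pvRankFold_main w _ _ _ hpw
  · intro x hx hxn
    exact absurd ((hmem x).2 hx) hxn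
  · rw [List.countP_eq_zero.2 (fun x hx => by simpa using (hmem x).2 hx)]
    rfl
  · exact (hmem v).2 hv


lemma pvSumSingle (l : List Nat) (hnd : l.Nodup) (k : Nat) (hk : k ∈ l) (c : Int) :
    (l.map (fun y => if y = k then c else 0)).sum = c := by
  induction l with
  | nil => simp at hk
  | cons x xs ih =>
      rcases List.nodup_cons.1 hnd with ⟨hx, hxs⟩
      rcases List.mem_cons.1 hk with rfl | hk'
      · simp only [List.map_cons, List.sum_cons, if_pos rfl]
        rw [pvSumZero _ _ (fun y hy => by
          rw [if_neg]; intro h; exact hx (by rw [← h]; exact hy)), add_zero]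
        simp
      · have hxk : x ≠ k := fun h => hx (h ▸ hk')
        simp only [List.map_cons, List.sum_cons, if_neg hxk, zero_add]
        exact ih hxs hk'

lemma pvPairsOf_sum_zero (l : List Nat) (k : Nat) (hk : k ∉ l)
    (g : Nat × Nat → Int) (h0 : ∀ y z, y ≠ k → z ≠ k → g (y, z) = 0) :
    ((pvPairsOf l).map g).sum = 0 := by
  apply pvSumZero
  intro q hq
  induction l with
  | nil => simp [pvPairsOf] at hq
  | cons x xs ih =>
      rcases List.mem_append.1 hq with hq1 | hq2
      · rcases List.mem_map.1 hq1 with ⟨y, hy, rfl⟩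
        exact h0 x y (fun h => hk (h ▸ List.mem_cons_self ..))
          (fun h => hk (List.mem_cons_of_mem _ (h ▸ hy)))
      · exact ih (fun h => hk (List.mem_cons_of_mem _ h)) hq2

lemma pvPairsOf_sum_centred (l : List Nat) (k : Nat) (hk : k ∈ l) (hnd : l.Nodup)
    (g : Nat × Nat → Int) (h : Nat → Int)
    (h1 : ∀ y, g (k, y) = h y) (h2 : ∀ y, g (y, k) = h y)
    (h0 : ∀ y z, y ≠ k → z ≠ k → g (y, z) = 0) :
    ((pvPairsOf l).map g).sum = (l.map (fun y => if y = k then 0 else h y)).sum := by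
  induction l with
  | nil => simp at hk
  | cons x xs ih =>
      rcases List.nodup_cons.1 hnd with ⟨hx, hxs⟩
      rw [pvPairsOf, List.map_append, List.sum_append, List.map_map,
        List.map_cons, List.sum_cons]
      simp only [Function.comp_def]
      by_cases hxk : x = k
      · subst hxk
        rw [if_pos rfl, zero_add, pvPairsOf_sum_zero xs x hx g h0, add_zero]
        exact congrArg List.sum (List.map_congr_left (fun y hy => by
          rw [h1 y, if_neg (fun hh => hx (by rw [← hh]; exact hy))]))
      · have hk' : k ∈ xs := by
          rcases List.mem_cons.1 hk with h | h
          · exact absurd h.symm hxk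
          · exact h
        rw [if_neg hxk, ih hk' hxs]
        have hfst : (List.map (fun y => g (x, y)) xs).sum = h x := by
          rw [show (fun y => g (x, y)) = (fun y => if y = k then h x else 0) from ?_]
          · exact pvSumSingle xs hxs k hk' (h x)
          · funext y
            by_cases hyk : y = k
            · subst hyk; rw [if_pos rfl, h2]
            · rw [if_neg hyk, h0 x y hxk hyk]
        rw [hfst]


def pvHistD (gifts : List String) : PySem.Dict String Int :=
  gifts.foldl (fun d g => d.modify g 0 (· + 1)) PySem.Dict.empty

lemma pvHistD_getD (gifts : List String) (s : String) :
    (pvHistD gifts).getD s 0 = (gifts.count s : Int) := by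
  unfold pvHistD
  rw [PySem.Dict.getD_foldl_modify_add_one, PySem.Dict.getD_empty, zero_add]

lemma pvHistD_contains (gifts : List String) (s : String) :
    (pvHistD gifts).contains s = true ↔ s ∈ gifts := by
  rw [PySem.Dict.contains_iff_mem_keys]
  unfold pvHistD
  rw [PySem.Dict.keys_foldl_modify_key gifts (fun g => g) 0 (fun _ _ v => v + 1),
    PySem.Dict.keys_empty, PySem.Set.update_nil_left, List.map_id', PySem.Set.mem_ofList]

lemma pvPcD_getD (friends gifts : List String) (p : Int × Int) :
    (pvPcD friends gifts).getD p 0 = ((gifts.map (pvKeyIdx friends)).count p : Int) := by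
  unfold pvPcD
  rw [PySem.Dict.getD_foldl_modify_add_one, PySem.Dict.getD_empty, zero_add]

lemma pvPcD_keys (friends gifts : List String) :
    (pvPcD friends gifts).keys = PySem.Set.ofList (gifts.map (pvKeyIdx friends)) := by
  unfold pvPcD
  rw [PySem.Dict.keys_foldl_modify_key (gifts.map (pvKeyIdx friends)) (fun p => p) 0
    (fun _ _ v => v + 1), PySem.Dict.keys_empty, PySem.Set.update_nil_left, List.map_id']

lemma pvPcD_keys_nodup (friends gifts : List String) :
    (pvPcD friends gifts).keys.Nodup := by
  rw [pvPcD_keys]; exact PySem.Set.nodup_ofList _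

lemma pvF_eq_getElem (friends : List String) (i : Nat) (hi : i < friends.length) :
    pvF friends i = friends[i] := List.getD_eq_getElem _ _ hi

lemma pvCharsInj (b y : List Char) (hb : ∀ c ∈ b, PySem.Chars.isspace c = false) :
    ∀ (a x : List Char), (∀ c ∈ a, PySem.Chars.isspace c = false) →
      a ++ ' ' :: b = x ++ ' ' :: y → x = a ∧ y = b := by
  intro a
  induction a with
  | nil =>
      intro x _ he
      cases x with
      | nil =>
          refine ⟨rfl, ?_⟩
          simp only [List.nil_append, List.cons.injEq] at he
          exact he.2.symm
      | cons d x' =>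
          simp only [List.nil_append, List.cons_append, List.cons.injEq] at he
          exfalso
          have hm : ' ' ∈ b := by
            rw [he.2]
            exact List.mem_append_right _ (List.mem_cons_self ..)
          exact absurd (hb ' ' hm) (by decide)
  | cons c a' ih =>
      intro x ha he
      cases x with
      | nil =>
          simp only [List.cons_append, List.nil_append, List.cons.injEq] at he
          exfalso
          have hc := ha c (List.mem_cons_self ..)
          rw [he.1] at hc
          exact absurd hc (by decide)
      | cons d x' =>
          simp only [List.cons_append, List.cons.injEq] at he
          obtain ⟨hx, hy⟩ := ih x' (fun e he' => ha e (List.mem_cons_of_mem _ he')) he.2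
          exact ⟨by rw [hx, he.1], hy⟩

lemma pvStr_toList (friends : List String) (i j : Nat) :
    (pvStr friends i j).toList = (pvF friends i).toList ++ ' ' :: (pvF friends j).toList := by
  rw [pvStr, String.toList_append, String.toList_append]
  simp

lemma pvStr_tok_inj (friends : List String) (hnd : friends.Nodup)
    (i j i' j' : Nat) (hi : i < friends.length) (hj : j < friends.length)
    (hi' : i' < friends.length) (hj' : j' < friends.length)
    (gi' : pvGood (pvF friends i')) (gj' : pvGood (pvF friends j'))
    (he : pvStr friends i j = pvStr friends i' j') : i = i' ∧ j = j' := by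
  have he' : (pvF friends i').toList ++ ' ' :: (pvF friends j').toList =
      (pvF friends i).toList ++ ' ' :: (pvF friends j).toList := by
    rw [← pvStr_toList, ← pvStr_toList, he]
  obtain ⟨h1, h2⟩ := pvCharsInj _ _ (pvNoWs _ gj'.2) _ _ (pvNoWs _ gi'.2) he'
  have e1 : pvF friends i = pvF friends i' := String.toList_inj.mp h1
  have e2 : pvF friends j = pvF friends j' := String.toList_inj.mp h2
  rw [pvF_eq_getElem _ _ hi, pvF_eq_getElem _ _ hi'] at e1
  rw [pvF_eq_getElem _ _ hj, pvF_eq_getElem _ _ hj'] at e2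
  exact ⟨(List.Nodup.getElem_inj_iff hnd).1 e1, (List.Nodup.getElem_inj_iff hnd).1 e2⟩

lemma pvKeyIdx_str (friends : List String) (hnd : friends.Nodup)
    (i j : Nat) (hi : i < friends.length) (hj : j < friends.length)
    (gi : pvGood (pvF friends i)) (gj : pvGood (pvF friends j)) :
    pvKeyIdx friends (pvStr friends i j) = ((i : Int), (j : Int)) := by
  unfold pvKeyIdx
  rw [show PySem.Str.split₀ (pvStr friends i j) = [pvF friends i, pvF friends j] from
    pvSplit_concat _ _ gi.1 gj.1 (pvNoWs _ gi.2) (pvNoWs _ gj.2)]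
  change ((pvIndexing friends).getD (pvF friends i) 0, (pvIndexing friends).getD (pvF friends j) 0) = _
  rw [pvIdx_spec friends hnd i hi, pvIdx_spec friends hnd j hj]

lemma pvGift_shape (friends gifts : List String) (h : Pre_solution friends gifts)
    (g : String) (hg : g ∈ gifts) :
    ∃ i j, i < friends.length ∧ j < friends.length ∧
      pvGood (pvF friends i) ∧ pvGood (pvF friends j) ∧ g = pvStr friends i j := by
  obtain ⟨a, ha, b, hb, rfl, ga, gb, -⟩ := pvPreSplit friends gifts h g hg
  obtain ⟨i, hi, rfl⟩ := List.mem_iff_getElem.1 ha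
  obtain ⟨j, hj, rfl⟩ := List.mem_iff_getElem.1 hb
  refine ⟨i, j, hi, hj, ?_, ?_, ?_⟩
  · rw [pvF_eq_getElem _ _ hi]; exact ga
  · rw [pvF_eq_getElem _ _ hj]; exact gb
  · rw [pvStr, pvF_eq_getElem _ _ hi, pvF_eq_getElem _ _ hj]

lemma pvC_pc (friends gifts : List String) (h : Pre_solution friends gifts)
    (i j : Nat) (hi : i < friends.length) (hj : j < friends.length) :
    (pvPcD friends gifts).getD ((i : Int), (j : Int)) 0 = (pvC friends gifts i j : Int) := by
  have hnd := h.2.1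
  rw [pvPcD_getD]
  congr 1
  unfold pvC
  rw [List.count_eq_countP, List.count_eq_countP, List.countP_map]
  apply List.countP_congr
  intro g hg
  obtain ⟨i', j', hi', hj', gi', gj', rfl⟩ := pvGift_shape friends gifts h g hg
  simp only [Function.comp_apply, pvKeyIdx_str friends hnd i' j' hi' hj' gi' gj', beq_iff_eq,
    Prod.mk.injEq]
  constructor
  · rintro ⟨h1, h2⟩
    have : i' = i ∧ j' = j := ⟨by exact_mod_cast h1, by exact_mod_cast h2⟩
    rw [this.1, this.2]
  · intro he
    obtain ⟨h1, h2⟩ := pvStr_tok_inj friends hnd i j i' j' hi hj hi' hj' gi' gj'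
      (by exact_mod_cast he.symm)
    exact ⟨by exact_mod_cast h1.symm, by exact_mod_cast h2.symm⟩

lemma pvMem_keys_iff (friends gifts : List String) (h : Pre_solution friends gifts)
    (p : Int × Int) :
    p ∈ (pvPcD friends gifts).keys ↔
      ∃ i j, i < friends.length ∧ j < friends.length ∧ p = ((i : Int), (j : Int)) ∧
        pvC friends gifts i j ≠ 0 := by
  have hnd := h.2.1
  rw [pvPcD_keys, PySem.Set.mem_ofList, List.mem_map]
  constructor
  · rintro ⟨g, hg, rfl⟩
    obtain ⟨i, j, hi, hj, gi, gj, rfl⟩ := pvGift_shape friends gifts h g hg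
    refine ⟨i, j, hi, hj, pvKeyIdx_str friends hnd i j hi hj gi gj, ?_⟩
    unfold pvC
    rw [← List.count_pos_iff] at hg
    omega
  · rintro ⟨i, j, hi, hj, rfl, hc⟩
    have hmem : pvStr friends i j ∈ gifts := by
      unfold pvC at hc
      rw [← List.count_pos_iff]
      omega
    obtain ⟨i0, j0, hi0, hj0, gi0, gj0, heq⟩ := pvGift_shape friends gifts h _ hmem
    obtain ⟨e1, e2⟩ := pvStr_tok_inj friends hnd i j i0 j0 hi hj hi0 hj0 gi0 gj0 heq
    refine ⟨pvStr friends i j, hmem, ?_⟩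
    rw [heq, pvKeyIdx_str friends hnd i0 j0 hi0 hj0 gi0 gj0, e1, e2]

lemma pvSetD_getD (n : Nat) (nm : List Int) (hlen : nm.length = n) (t : Nat) (ht : t < n)
    (v : Int) (k : Nat) (hk : k < n) :
    (PySem.List.pySetD nm (t : Int) v).getD k 0 = if k = t then v else nm.getD k 0 := by
  rw [PySem.List.pySetD_natCast,
    List.getD_eq_getElem _ _ (by rw [List.length_set]; omega), List.getElem_set]
  by_cases hkt : k = t
  · rw [if_pos (by omega), if_pos hkt]
  · rw [if_neg (by omega), if_neg hkt, List.getD_eq_getElem _ _ (by omega)]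

lemma pvSetD_length (nm : List Int) (t : Int) (v : Int) :
    (PySem.List.pySetD nm t v).length = nm.length := PySem.List.length_pySetD ..

lemma pvBump_point (n : Nat) (nm : List Int) (h : nm.length = n) (o : Option Nat)
    (ho : ∀ k, o = some k → k < n) :
    (pvBump nm o).length = n ∧
      ∀ k, k < n → (pvBump nm o).getD k 0 = nm.getD k 0 + (if o = some k then 1 else 0) := by
  cases o with
  | none => refine ⟨h, fun k hk => by simp [pvBump]⟩
  | some j =>
      have hj : j < n := ho j rfl
      refine ⟨by rw [pvBump, pvSetD_length, h], fun k hk => ?_⟩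
      rw [pvBump, pvSetD_getD n nm h j hj _ k hk, PySem.List.pyGetD_natCast]
      by_cases hkj : k = j
      · subst hkj; rw [if_pos rfl, if_pos rfl]
      · rw [if_neg hkj, if_neg (fun hh => hkj (Option.some_inj.1 hh).symm), add_zero]

lemma pvCompare_eq (friends gifts : List String) (h : Pre_solution friends gifts)
    (i j : Nat) (hi : i < friends.length) (hj : j < friends.length) (nm : List Int) :
    pvCompareWeight (pvF friends i) (pvF friends j) (pvW friends gifts) (pvIndexing friends) nm =
      pvBump nm (pvDecW friends gifts i j) := by
  have hnd := h.2.1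
  unfold pvCompareWeight pvDecW pvBump pvWv
  rw [pvIdx_spec friends hnd i hi, pvIdx_spec friends hnd j hj]
  simp only [PySem.List.pyGetD_natCast]
  rcases lt_trichotomy ((pvW friends gifts).getD i 0) ((pvW friends gifts).getD j 0)
    with hlt | heq | hgt
  · rw [if_neg (by omega), if_pos (by omega), if_neg (by omega), if_pos (by omega)]
  · rw [if_neg (by omega), if_neg (by omega), if_neg (by omega), if_neg (by omega)]
  · rw [if_pos (by omega), if_pos (by omega)]

lemma pvPairA_step (friends gifts : List String) (h : Pre_solution friends gifts)
    (i j : Nat) (hi : i < friends.length) (hj : j < friends.length) (nm : List Int) :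
    pvPairLoopA (pvIndexing friends) (pvW friends gifts) (pvHistD gifts) nm
      [pvF friends i, pvF friends j] = pvBump nm (pvDec friends gifts i j) := by
  have hnd := h.2.1
  have hs1 : pvF friends i ++ " " ++ pvF friends j = pvStr friends i j := rfl
  have hs2 : pvF friends j ++ " " ++ pvF friends i = pvStr friends j i := rfl
  unfold pvPairLoopA
  simp only [hs1, hs2]
  rcases Nat.lt_trichotomy (pvC friends gifts i j) (pvC friends gifts j i) with hlt | heq | hgt
  · conv_rhs => rw [pvDec, if_neg (by omega : ¬ pvC friends gifts i j = pvC friends gifts j i),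
      if_neg (by omega : ¬ pvC friends gifts i j > pvC friends gifts j i)]
    have hc2 : (pvHistD gifts).contains (pvStr friends j i) = true :=
      (pvHistD_contains ..).2 (by
        rw [← List.count_pos_iff]
        have : pvC friends gifts j i = List.count (pvStr friends j i) gifts := rfl
        omega)
    rw [hc2]
    simp only [Bool.or_true, if_true]
    rw [pvHistD_getD, pvHistD_getD]
    have e1 : (List.count (pvStr friends i j) gifts : Int) = (pvC friends gifts i j : Int) := rfl
    have e2 : (List.count (pvStr friends j i) gifts : Int) = (pvC friends gifts j i : Int) := rfl
    rw [e1, e2, if_neg (by exact_mod_cast (by omega : ¬ pvC friends gifts j i < pvC friends gifts i j)),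
      if_pos (by exact_mod_cast hlt), pvIdx_spec friends hnd j hj]
    rfl
  · conv_rhs => rw [pvDec, if_pos heq]
    by_cases hc : ((pvHistD gifts).contains (pvStr friends i j) ||
        (pvHistD gifts).contains (pvStr friends j i)) = true
    · rw [if_pos hc, pvHistD_getD, pvHistD_getD]
      have e1 : (List.count (pvStr friends i j) gifts : Int) = (pvC friends gifts i j : Int) := rfl
      have e2 : (List.count (pvStr friends j i) gifts : Int) = (pvC friends gifts j i : Int) := rfl
      rw [e1, e2, if_neg (by exact_mod_cast (by omega : ¬ pvC friends gifts j i < pvC friends gifts i j)),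
        if_neg (by exact_mod_cast (by omega : ¬ pvC friends gifts i j < pvC friends gifts j i))]
      exact pvCompare_eq friends gifts h i j hi hj nm
    · rw [if_neg hc]
      exact pvCompare_eq friends gifts h i j hi hj nm
  · conv_rhs => rw [pvDec, if_neg (by omega : ¬ pvC friends gifts i j = pvC friends gifts j i),
      if_pos hgt]
    have hc1 : (pvHistD gifts).contains (pvStr friends i j) = true :=
      (pvHistD_contains ..).2 (by
        rw [← List.count_pos_iff]
        have : pvC friends gifts i j = List.count (pvStr friends i j) gifts := rfl
        omega)
    rw [hc1]
    simp only [Bool.true_or, if_true]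
    rw [pvHistD_getD, pvHistD_getD]
    have e1 : (List.count (pvStr friends i j) gifts : Int) = (pvC friends gifts i j : Int) := rfl
    have e2 : (List.count (pvStr friends j i) gifts : Int) = (pvC friends gifts j i : Int) := rfl
    rw [e1, e2, if_pos (by exact_mod_cast hgt), pvIdx_spec friends hnd i hi]
    rfl

def pvNmA (friends gifts : List String) : List Int :=
  (pvPairsOf (List.range friends.length)).foldl
    (fun nm q => pvBump nm (pvDec friends gifts q.1 q.2)) (List.replicate friends.length 0)

def pvNmB0 (friends gifts : List String) : List Int :=
  (pvW friends gifts).map (fun v => (pvRank (pvW friends gifts)).getD v 0)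

def pvNmB (friends gifts : List String) : List Int :=
  ((pvPcD friends gifts).keys).foldl
    (pvCorrect (pvW friends gifts) (pvPcD friends gifts)) (pvNmB0 friends gifts)


lemma pvSkip_mk1 (friends gifts : List String) (p : Int × Int) (h : p.1 = p.2) :
    pvSkip friends gifts p := by unfold pvSkip; exact Or.inl h
lemma pvSkip_mk2 (friends gifts : List String) (p : Int × Int)
    (h : p.1 > p.2 ∧ (pvPcD friends gifts).contains (p.2, p.1) = true) :
    pvSkip friends gifts p := by unfold pvSkip; exact Or.inr (Or.inl h)
lemma pvSkip_mk3 (friends gifts : List String) (p : Int × Int)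
    (h : (pvPcD friends gifts).getD (p.1, p.2) 0 = (pvPcD friends gifts).getD (p.2, p.1) 0) :
    pvSkip friends gifts p := by unfold pvSkip; exact Or.inr (Or.inr h)

lemma pvDecW_swap (friends gifts : List String) (i j : Nat) :
    pvDecW friends gifts j i = pvDecW friends gifts i j := by
  unfold pvDecW
  rcases lt_trichotomy (pvWv friends gifts i) (pvWv friends gifts j) with hlt | heq | hgt
  · rw [if_pos (by omega), if_neg (by omega), if_pos (by omega)]
  · rw [if_neg (by omega), if_neg (by omega), if_neg (by omega), if_neg (by omega)]
  · rw [if_neg (by omega), if_pos (by omega), if_pos (by omega)]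

lemma pvCanon_natCast (i j : Nat) :
    pvCanon ((i : Int), (j : Int)) = if i ≤ j then (i, j) else (j, i) := by
  unfold pvCanon
  by_cases hij : (i : Int) ≤ (j : Int)
  · rw [if_pos hij, if_pos (by exact_mod_cast hij)]
    simp
  · rw [if_neg hij, if_neg (fun hh => hij (by exact_mod_cast hh))]
    simp

lemma pvDD_canon (friends gifts : List String) (i j : Nat) (hne : i ≠ j)
    (hc : pvC friends gifts i j ≠ pvC friends gifts j i) (k : Nat) :
    pvDD friends gifts (pvCanon ((i : Int), (j : Int))) k =
      (if (if pvC friends gifts i j > pvC friends gifts j i then i else j) = k then 1 else 0) -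
        (if pvDecW friends gifts i j = some k then 1 else 0) := by
  rw [pvCanon_natCast]
  by_cases hij : i ≤ j
  · rw [if_pos hij]
    unfold pvDD pvDA pvDW pvDec
    rw [if_neg hc]
    by_cases hw : (if pvC friends gifts i j > pvC friends gifts j i then i else j) = k
    · rw [if_pos (show some (if pvC friends gifts i j > pvC friends gifts j i then i else j) = some k by rw [hw]),
        if_pos hw]
    · rw [if_neg (show ¬ some (if pvC friends gifts i j > pvC friends gifts j i then i else j) = some k from
        fun hh => hw (Option.some_inj.1 hh)), if_neg hw]
  · rw [if_neg hij]
    unfold pvDD pvDA pvDW pvDec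
    dsimp only
    rw [if_neg (fun hh : pvC friends gifts j i = pvC friends gifts i j => hc hh.symm),
      pvDecW_swap]
    have harg : (if pvC friends gifts j i > pvC friends gifts i j then j else i) =
        (if pvC friends gifts i j > pvC friends gifts j i then i else j) := by
      by_cases hgt : pvC friends gifts i j > pvC friends gifts j i
      · rw [if_neg (by omega), if_pos hgt]
      · rw [if_pos (by omega), if_neg hgt]
    rw [harg]
    by_cases hw : (if pvC friends gifts i j > pvC friends gifts j i then i else j) = k
    · rw [if_pos (show some (if pvC friends gifts i j > pvC friends gifts j i then i else j) = some k by rw [hw]),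
        if_pos hw]
    · rw [if_neg (show ¬ some (if pvC friends gifts i j > pvC friends gifts j i then i else j) = some k from
        fun hh => hw (Option.some_inj.1 hh)), if_neg hw]

lemma pvCorrect_step (friends gifts : List String) (h : Pre_solution friends gifts)
    (i j : Nat) (hi : i < friends.length) (hj : j < friends.length) (nm : List Int)
    (hlen : nm.length = friends.length) :
    (pvCorrect (pvW friends gifts) (pvPcD friends gifts) nm ((i : Int), (j : Int))).length = friends.length ∧
      ∀ k, k < friends.length →
        (pvCorrect (pvW friends gifts) (pvPcD friends gifts) nm ((i : Int), (j : Int))).getD k 0 =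
          nm.getD k 0 + pvDB friends gifts ((i : Int), (j : Int)) k := by
  unfold pvCorrect
  dsimp only
  by_cases h1 : (i : Int) = (j : Int)
  · rw [if_pos h1]
    exact ⟨hlen, fun k hk => by rw [pvDB, if_pos (pvSkip_mk1 friends gifts _ h1), add_zero]⟩
  · rw [if_neg h1]
    by_cases h2 : (i : Int) > (j : Int) ∧ (pvPcD friends gifts).contains ((j : Int), (i : Int)) = true
    · rw [if_pos h2]
      exact ⟨hlen, fun k hk => by rw [pvDB, if_pos (pvSkip_mk2 friends gifts _ h2), add_zero]⟩
    · rw [if_neg h2]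
      have hgi := pvC_pc friends gifts h i j hi hj
      have hgj := pvC_pc friends gifts h j i hj hi
      by_cases h3 : (pvPcD friends gifts).getD ((i : Int), (j : Int)) 0 =
          (pvPcD friends gifts).getD ((j : Int), (i : Int)) 0
      · rw [if_pos h3]
        exact ⟨hlen, fun k hk => by rw [pvDB, if_pos (pvSkip_mk3 friends gifts _ h3), add_zero]⟩
      · rw [if_neg h3]
        have hne : i ≠ j := fun hh => h1 (by exact_mod_cast hh)
        have hcne : pvC friends gifts i j ≠ pvC friends gifts j i := by
          intro hh; exact h3 (by rw [hgi, hgj, hh])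
        have hns : ¬ pvSkip friends gifts ((i : Int), (j : Int)) := by
          intro hs
          unfold pvSkip at hs
          rcases hs with hs | hs | hs
          · exact h1 hs
          · exact h2 hs
          · exact h3 hs
        rw [hgi, hgj]
        simp only [PySem.List.pyGetD_natCast]
        have hWi : (pvW friends gifts).getD i 0 = pvWv friends gifts i := rfl
        have hWj : (pvW friends gifts).getD j 0 = pvWv friends gifts j := rfl
        rw [hWi, hWj]
        by_cases hcgt : pvC friends gifts i j > pvC friends gifts j i
        · rw [if_pos (show ((pvC friends gifts i j : Int) > (pvC friends gifts j i : Int)) by exact_mod_cast hcgt)]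
          have hwinn : (if pvC friends gifts i j > pvC friends gifts j i then i else j) = i :=
            if_pos hcgt
          rcases lt_trichotomy (pvWv friends gifts i) (pvWv friends gifts j) with hlt | heq | hgt
          · rw [if_neg (show ¬ pvWv friends gifts i > pvWv friends gifts j by omega), if_pos (show pvWv friends gifts j > pvWv friends gifts i by omega)]
            have hlen1 : (PySem.List.pySetD nm (j : Int) (nm.getD j 0 - 1)).length = friends.length := by
              rw [pvSetD_length, hlen]
            refine ⟨by rw [pvSetD_length, hlen1], fun k hk => ?_⟩
            rw [pvSetD_getD _ _ hlen1 i hi _ k hk, PySem.List.pyGetD_natCast,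
              pvSetD_getD _ _ hlen j hj _ i hi, pvSetD_getD _ _ hlen j hj _ k hk,
              pvDB, if_neg hns, pvDD_canon friends gifts i j hne hcne k, hwinn,
              show pvDecW friends gifts i j = some j by
                unfold pvDecW; rw [if_neg (by omega), if_pos (by omega)]]
            simp only [Option.some_inj]
            by_cases hki : k = i
            · subst hki; split_ifs <;> first | omega | exact (‹False›).elim
            · by_cases hkj : k = j
              · subst hkj; split_ifs <;> first | omega | exact (‹False›).elim
              · split_ifs <;> first | omega | exact (‹False›).elim
          · rw [if_neg (show ¬ pvWv friends gifts i > pvWv friends gifts j by omega), if_neg (show ¬ pvWv friends gifts j > pvWv friends gifts i by omega)]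
            refine ⟨by rw [pvSetD_length, hlen], fun k hk => ?_⟩
            rw [pvSetD_getD _ _ hlen i hi _ k hk, PySem.List.pyGetD_natCast,
              pvDB, if_neg hns, pvDD_canon friends gifts i j hne hcne k, hwinn,
              show pvDecW friends gifts i j = none by
                unfold pvDecW; rw [if_neg (by omega), if_neg (by omega)]]
            by_cases hki : k = i
            · subst hki; split_ifs <;> first | omega | exact (‹False›).elim
            · split_ifs <;> first | omega | exact (‹False›).elim
          · rw [if_pos (show pvWv friends gifts i > pvWv friends gifts j by omega)]
            have hlen1 : (PySem.List.pySetD nm (i : Int) (nm.getD i 0 - 1)).length = friends.length := by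
              rw [pvSetD_length, hlen]
            refine ⟨by rw [pvSetD_length, hlen1], fun k hk => ?_⟩
            rw [pvSetD_getD _ _ hlen1 i hi _ k hk, PySem.List.pyGetD_natCast,
              pvSetD_getD _ _ hlen i hi _ i hi, pvSetD_getD _ _ hlen i hi _ k hk,
              pvDB, if_neg hns, pvDD_canon friends gifts i j hne hcne k, hwinn,
              show pvDecW friends gifts i j = some i by
                unfold pvDecW; rw [if_pos (by omega)]]
            simp only [Option.some_inj]
            by_cases hki : k = i
            · subst hki; split_ifs <;> first | omega | exact (‹False›).elim
            · split_ifs <;> first | omega | exact (‹False›).elim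
        · rw [if_neg (show ¬ ((pvC friends gifts i j : Int) > (pvC friends gifts j i : Int)) from fun hh => hcgt (by exact_mod_cast hh))]
          have hwinn : (if pvC friends gifts i j > pvC friends gifts j i then i else j) = j :=
            if_neg hcgt
          rcases lt_trichotomy (pvWv friends gifts i) (pvWv friends gifts j) with hlt | heq | hgt
          · rw [if_neg (show ¬ pvWv friends gifts i > pvWv friends gifts j by omega), if_pos (show pvWv friends gifts j > pvWv friends gifts i by omega)]
            have hlen1 : (PySem.List.pySetD nm (j : Int) (nm.getD j 0 - 1)).length = friends.length := by
              rw [pvSetD_length, hlen]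
            refine ⟨by rw [pvSetD_length, hlen1], fun k hk => ?_⟩
            rw [pvSetD_getD _ _ hlen1 j hj _ k hk, PySem.List.pyGetD_natCast,
              pvSetD_getD _ _ hlen j hj _ j hj, pvSetD_getD _ _ hlen j hj _ k hk,
              pvDB, if_neg hns, pvDD_canon friends gifts i j hne hcne k, hwinn,
              show pvDecW friends gifts i j = some j by
                unfold pvDecW; rw [if_neg (by omega), if_pos (by omega)]]
            simp only [Option.some_inj]
            by_cases hkj : k = j
            · subst hkj; split_ifs <;> first | omega | exact (‹False›).elim
            · split_ifs <;> first | omega | exact (‹False›).elim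
          · rw [if_neg (show ¬ pvWv friends gifts i > pvWv friends gifts j by omega), if_neg (show ¬ pvWv friends gifts j > pvWv friends gifts i by omega)]
            refine ⟨by rw [pvSetD_length, hlen], fun k hk => ?_⟩
            rw [pvSetD_getD _ _ hlen j hj _ k hk, PySem.List.pyGetD_natCast,
              pvDB, if_neg hns, pvDD_canon friends gifts i j hne hcne k, hwinn,
              show pvDecW friends gifts i j = none by
                unfold pvDecW; rw [if_neg (by omega), if_neg (by omega)]]
            by_cases hkj : k = j
            · subst hkj; split_ifs <;> first | omega | exact (‹False›).elim
            · split_ifs <;> first | omega | exact (‹False›).elim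
          · rw [if_pos (show pvWv friends gifts i > pvWv friends gifts j by omega)]
            have hlen1 : (PySem.List.pySetD nm (i : Int) (nm.getD i 0 - 1)).length = friends.length := by
              rw [pvSetD_length, hlen]
            refine ⟨by rw [pvSetD_length, hlen1], fun k hk => ?_⟩
            rw [pvSetD_getD _ _ hlen1 j hj _ k hk, PySem.List.pyGetD_natCast,
              pvSetD_getD _ _ hlen i hi _ j hj, pvSetD_getD _ _ hlen i hi _ k hk,
              pvDB, if_neg hns, pvDD_canon friends gifts i j hne hcne k, hwinn,
              show pvDecW friends gifts i j = some i by
                unfold pvDecW; rw [if_pos (by omega)]]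
            simp only [Option.some_inj]
            by_cases hki : k = i
            · subst hki; split_ifs <;> first | omega | exact (‹False›).elim
            · by_cases hkj : k = j
              · subst hkj; split_ifs <;> first | omega | exact (‹False›).elim
              · split_ifs <;> first | omega | exact (‹False›).elim


lemma pvCountP_range (w : List Int) (p : Int → Bool) :
    w.countP p = (List.range w.length).countP (fun j => p (w.getD j 0)) := by
  induction w with
  | nil => rfl
  | cons x xs ih =>
      rw [List.length_cons, List.range_succ_eq_map, List.countP_cons, List.countP_cons,
        List.countP_map]
      have hcomp : ((fun j => p ((x :: xs).getD j 0)) ∘ Nat.succ) = fun j => p (xs.getD j 0) := by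
        funext j
        rfl
      rw [hcomp, ← ih]
      have h0 : (x :: xs).getD 0 0 = x := rfl
      rw [h0]

lemma pvDW_centred_h1 (friends gifts : List String) (k y : Nat) :
    pvDW friends gifts (k, y) k = if pvWv friends gifts y < pvWv friends gifts k then 1 else 0 := by
  unfold pvDW pvDecW
  rcases lt_trichotomy (pvWv friends gifts k) (pvWv friends gifts y) with hlt | heq | hgt
  · have hyk : y ≠ k := fun hh => by rw [hh] at hlt; exact lt_irrefl _ hlt
    rw [if_neg (show ¬ pvWv friends gifts k > pvWv friends gifts y by omega),
      if_pos (show pvWv friends gifts y > pvWv friends gifts k by omega),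
      if_neg (show ¬ some y = some k from fun hh => hyk (Option.some_inj.1 hh)),
      if_neg (show ¬ pvWv friends gifts y < pvWv friends gifts k by omega)]
  · rw [if_neg (show ¬ pvWv friends gifts k > pvWv friends gifts y by omega),
      if_neg (show ¬ pvWv friends gifts y > pvWv friends gifts k by omega),
      if_neg (show ¬ (none : Option Nat) = some k from by simp),
      if_neg (show ¬ pvWv friends gifts y < pvWv friends gifts k by omega)]
  · rw [if_pos (show pvWv friends gifts k > pvWv friends gifts y by omega),
      if_pos rfl, if_pos (show pvWv friends gifts y < pvWv friends gifts k by omega)]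

lemma pvDW_centred_h2 (friends gifts : List String) (k y : Nat) :
    pvDW friends gifts (y, k) k = if pvWv friends gifts y < pvWv friends gifts k then 1 else 0 := by
  unfold pvDW pvDecW
  rcases lt_trichotomy (pvWv friends gifts k) (pvWv friends gifts y) with hlt | heq | hgt
  · have hyk : y ≠ k := fun hh => by rw [hh] at hlt; exact lt_irrefl _ hlt
    rw [if_pos (show pvWv friends gifts y > pvWv friends gifts k by omega),
      if_neg (show ¬ some y = some k from fun hh => hyk (Option.some_inj.1 hh)),
      if_neg (show ¬ pvWv friends gifts y < pvWv friends gifts k by omega)]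
  · rw [if_neg (show ¬ pvWv friends gifts y > pvWv friends gifts k by omega),
      if_neg (show ¬ pvWv friends gifts k > pvWv friends gifts y by omega),
      if_neg (show ¬ (none : Option Nat) = some k from by simp),
      if_neg (show ¬ pvWv friends gifts y < pvWv friends gifts k by omega)]
  · rw [if_neg (show ¬ pvWv friends gifts y > pvWv friends gifts k by omega),
      if_pos (show pvWv friends gifts k > pvWv friends gifts y by omega),
      if_pos rfl, if_pos (show pvWv friends gifts y < pvWv friends gifts k by omega)]

lemma pvDW_centred_h0 (friends gifts : List String) (k y z : Nat) (hy : y ≠ k) (hz : z ≠ k) :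
    pvDW friends gifts (y, z) k = 0 := by
  unfold pvDW pvDecW
  by_cases h1 : pvWv friends gifts y > pvWv friends gifts z
  · rw [if_pos h1, if_neg (show ¬ some y = some k from fun hh => hy (Option.some_inj.1 hh))]
  · rw [if_neg h1]
    by_cases h2 : pvWv friends gifts z > pvWv friends gifts y
    · rw [if_pos h2, if_neg (show ¬ some z = some k from fun hh => hz (Option.some_inj.1 hh))]
    · rw [if_neg h2, if_neg (show ¬ (none : Option Nat) = some k from by simp)]

lemma pvSumIte (l : List Nat) (f : Nat → Prop) [DecidablePred f] (k : Nat) :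
    (l.map (fun y => if y = k then 0 else if f y then (1 : Int) else 0)).sum =
      (l.countP (fun y => !decide (y = k) && decide (f y)) : Int) := by
  induction l with
  | nil => rfl
  | cons x xs ih =>
      rw [List.map_cons, List.sum_cons, ih, List.countP_cons]
      by_cases h1 : x = k
      · simp [h1]
      · by_cases h2 : f x <;> simp [h1, h2] <;> push_cast <;> ring

lemma pvRank_as_pair_sum (friends gifts : List String) (k : Nat) (hk : k < friends.length) :
    ((pvW friends gifts).countP (fun x => decide (x < pvWv friends gifts k)) : Int) =
      ((pvPairsOf (List.range friends.length)).map
        (fun q => pvDW friends gifts q k)).sum := by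
  rw [pvPairsOf_sum_centred (List.range friends.length) k (List.mem_range.2 hk)
      (List.nodup_range)
      (fun q => pvDW friends gifts q k)
      (fun y => if pvWv friends gifts y < pvWv friends gifts k then 1 else 0)
      (fun y => pvDW_centred_h1 friends gifts k y)
      (fun y => pvDW_centred_h2 friends gifts k y)
      (fun y z hy hz => pvDW_centred_h0 friends gifts k y z hy hz)]
  rw [pvSumIte (List.range friends.length)
      (fun y => pvWv friends gifts y < pvWv friends gifts k) k]
  rw [pvCountP_range, pvW_length]
  congr 1
  apply List.countP_congr
  intro y hy
  by_cases hyk : y = k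
  · subst hyk
    simp [pvWv]
  · simp [pvWv, hyk]

lemma pvDA_split (friends gifts : List String) (q : Nat × Nat) (k : Nat) :
    pvDA friends gifts q k = pvDW friends gifts q k + pvDD friends gifts q k := by
  unfold pvDD; ring

lemma pvDD_zero_of_eq (friends gifts : List String) (q : Nat × Nat) (k : Nat)
    (h : pvC friends gifts q.1 q.2 = pvC friends gifts q.2 q.1) :
    pvDD friends gifts q k = 0 := by
  unfold pvDD pvDA pvDW pvDec
  rw [if_pos h]
  ring


lemma pvFriends_eq_map (friends : List String) :
    (List.range friends.length).map (pvF friends) = friends := by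
  apply List.ext_getElem (by simp)
  intro k h1 h2
  simp only [List.getElem_map, List.getElem_range]
  rw [pvF, List.getD_eq_getElem _ _ h2]

lemma pvDec_lt (friends gifts : List String) (i j k : Nat)
    (hi : i < friends.length) (hj : j < friends.length)
    (h : pvDec friends gifts i j = some k) : k < friends.length := by
  unfold pvDec pvDecW at h
  split_ifs at h <;> simp only [Option.some_inj] at h <;> omega

lemma pvSolutionA_eq (friends gifts : List String) (h : Pre_solution friends gifts) :
    solution friends gifts =
      (PySem.List.max? (pvNmA friends gifts) (fun x => x)).getD 0 := by
  unfold solution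
  dsimp only
  rw [pvGiftsA_split friends gifts]
  dsimp only
  rw [pvHistA_eq friends gifts h]
  have hcomb : PySem.List.combinations friends 2 =
      (pvPairsOf (List.range friends.length)).map (fun p => [pvF friends p.1, pvF friends p.2]) := by
    conv_lhs => rw [← pvFriends_eq_map friends]
    rw [PySem.List.combinations_map, pvCombinations_two, List.map_map]
    rfl
  rw [hcomb, List.foldl_map]
  refine congrArg (fun l => (PySem.List.max? l (fun x : Int => x)).getD 0) ?_
  unfold pvNmA
  apply PySem.List.foldl_congr_mem
  intro nm q hq
  rcases (mem_pvPairsOf_range _ q).1 hq with ⟨hij, hjn⟩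
  exact pvPairA_step friends gifts h q.1 q.2 (by omega) hjn nm

lemma pvNmA_char (friends gifts : List String) (h : Pre_solution friends gifts) :
    (pvNmA friends gifts).length = friends.length ∧
      ∀ k, k < friends.length →
        (pvNmA friends gifts).getD k 0 =
          ((pvPairsOf (List.range friends.length)).map
            (fun q => pvDA friends gifts q k)).sum := by
  unfold pvNmA
  have hmain := pvFoldPoint friends.length
      (fun nm q => pvBump nm (pvDec friends gifts q.1 q.2))
      (fun q k => pvDA friends gifts q k)
      (pvPairsOf (List.range friends.length))
      (fun nm q hq hlen => by
        rcases (mem_pvPairsOf_range _ q).1 hq with ⟨hij, hjn⟩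
        have := pvBump_point friends.length nm hlen (pvDec friends gifts q.1 q.2)
          (fun k hk => pvDec_lt friends gifts q.1 q.2 k (by omega) hjn hk)
        refine ⟨this.1, fun k hk => ?_⟩
        rw [(this.2 k hk)]
        rfl)
      (List.replicate friends.length 0) (by simp)
  refine ⟨hmain.1, fun k hk => ?_⟩
  rw [hmain.2 k hk, List.getD_replicate, zero_add]
  exact hk

lemma pvSolutionB_eq (friends gifts : List String) (h : Pre_solution friends gifts) :
    solution_alt friends gifts =
      (PySem.List.max? (pvNmB friends gifts) (fun x => x)).getD 0 := by
  unfold solution_alt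
  dsimp only
  rw [pvGiftsB_split friends gifts]
  dsimp only
  rw [pvPcB_eq friends gifts h]
  rfl

lemma pvNmB0_char (friends gifts : List String) :
    (pvNmB0 friends gifts).length = friends.length ∧
      ∀ k, k < friends.length →
        (pvNmB0 friends gifts).getD k 0 =
          ((pvW friends gifts).countP
            (fun x => decide (x < pvWv friends gifts k)) : Int) := by
  have hlen := pvW_length friends gifts
  refine ⟨by rw [pvNmB0, List.length_map, hlen], fun k hk => ?_⟩
  rw [pvNmB0, List.getD_eq_getElem _ _ (by rw [List.length_map, hlen]; omega),
    List.getElem_map]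
  have hwk : (pvW friends gifts)[k] = pvWv friends gifts k := by
    rw [pvWv, List.getD_eq_getElem _ _ (by omega)]
  rw [hwk]
  exact pvRank_spec (pvW friends gifts) _ (by rw [← hwk]; exact List.getElem_mem _)

lemma pvNmB_char (friends gifts : List String) (h : Pre_solution friends gifts) :
    (pvNmB friends gifts).length = friends.length ∧
      ∀ k, k < friends.length →
        (pvNmB friends gifts).getD k 0 =
          (pvNmB0 friends gifts).getD k 0 +
            (((pvPcD friends gifts).keys).map
              (fun p => pvDB friends gifts p k)).sum := by
  unfold pvNmB
  exact pvFoldPoint friends.length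
    (pvCorrect (pvW friends gifts) (pvPcD friends gifts))
    (fun p k => pvDB friends gifts p k)
    ((pvPcD friends gifts).keys)
    (fun nm p hp hlen => by
      rcases (pvMem_keys_iff friends gifts h p).1 hp with ⟨i, j, hi, hj, rfl, -⟩
      exact pvCorrect_step friends gifts h i j hi hj nm hlen)
    (pvNmB0 friends gifts) (pvNmB0_char friends gifts).1


lemma pvNotSkip (friends gifts : List String) (p : Int × Int)
    (h : (!decide (pvSkip friends gifts p)) = true) : ¬ pvSkip friends gifts p := by
  intro hs
  rw [decide_eq_true hs] at h
  exact absurd h (by decide)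

lemma pvNotSkip' (friends gifts : List String) (p : Int × Int)
    (h : ¬ pvSkip friends gifts p) : (!decide (pvSkip friends gifts p)) = true := by
  rw [decide_eq_false h]
  rfl

lemma pvSkipOf (friends gifts : List String) (p : Int × Int)
    (h : (!decide (pvSkip friends gifts p)) = false) : pvSkip friends gifts p := by
  by_contra hs
  rw [decide_eq_false hs] at h
  exact absurd h (by decide)

lemma pvKeys_shape (friends gifts : List String) (h : Pre_solution friends gifts)
    (p : Int × Int) (hp : p ∈ (pvPcD friends gifts).keys) (hns : ¬ pvSkip friends gifts p) :
    ∃ i j, i < friends.length ∧ j < friends.length ∧ p = ((i : Int), (j : Int)) ∧ i ≠ j ∧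
      pvC friends gifts i j ≠ pvC friends gifts j i := by
  rcases (pvMem_keys_iff friends gifts h p).1 hp with ⟨i, j, hi, hj, rfl, hc⟩
  unfold pvSkip at hns
  push_neg at hns
  refine ⟨i, j, hi, hj, rfl, fun hh => hns.1 (by rw [hh]), fun hh => hns.2.2 ?_⟩
  rw [pvC_pc friends gifts h i j hi hj, pvC_pc friends gifts h j i hj hi, hh]

lemma pvPerm_canon (friends gifts : List String) (h : Pre_solution friends gifts) :
    ((((pvPcD friends gifts).keys).filter
        (fun p => !decide (pvSkip friends gifts p))).map pvCanon).Perm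
      ((pvPairsOf (List.range friends.length)).filter
        (fun q => !decide (pvC friends gifts q.1 q.2 = pvC friends gifts q.2 q.1))) := by
  have hknd : (((pvPcD friends gifts).keys).filter
      (fun p => !decide (pvSkip friends gifts p))).Nodup :=
    (pvPcD_keys_nodup friends gifts).filter _
  refine (List.perm_ext_iff_of_nodup ?nd ((nodup_pvPairsOf_range _).filter _)).2 ?mem
  case mem =>
    intro q
    constructor
    · intro hq
      rcases List.mem_map.1 hq with ⟨p, hpf, rfl⟩
      rcases List.mem_filter.1 hpf with ⟨hpk, hpb⟩
      have hns : ¬ pvSkip friends gifts p := pvNotSkip _ _ _ hpb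
      rcases pvKeys_shape friends gifts h p hpk hns with ⟨i, j, hi, hj, rfl, hij, hcne⟩
      rw [List.mem_filter, pvCanon_natCast]
      by_cases hle : i ≤ j
      · rw [if_pos hle]
        exact ⟨(mem_pvPairsOf_range _ _).2 ⟨by omega, hj⟩, by simpa using hcne⟩
      · rw [if_neg hle]
        exact ⟨(mem_pvPairsOf_range _ _).2 ⟨by omega, hi⟩,
          by simpa using fun hh => hcne hh.symm⟩
    · intro hq
      rcases List.mem_filter.1 hq with ⟨hqp, hqb⟩
      rcases (mem_pvPairsOf_range _ q).1 hqp with ⟨hij, hjn⟩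
      have hcne : pvC friends gifts q.1 q.2 ≠ pvC friends gifts q.2 q.1 := by simpa using hqb
      rcases q with ⟨i, j⟩
      dsimp only at hij hjn hcne ⊢
      have hi : i < friends.length := by omega
      by_cases hc1 : pvC friends gifts i j = 0
      · have hc2 : pvC friends gifts j i ≠ 0 := by
          intro hh
          exact hcne (by rw [hc1, hh])
        have hpk : ((j : Int), (i : Int)) ∈ (pvPcD friends gifts).keys :=
          (pvMem_keys_iff friends gifts h _).2 ⟨j, i, hjn, hi, rfl, hc2⟩
        have hns : ¬ pvSkip friends gifts ((j : Int), (i : Int)) := by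
          unfold pvSkip
          push_neg
          dsimp only
          refine ⟨?_, fun _ hcont => ?_, ?_⟩
          · intro hh
            have : j = i := by exact_mod_cast hh
            omega
          · rw [PySem.Dict.contains_iff_mem_keys] at hcont
            rcases (pvMem_keys_iff friends gifts h _).1 hcont with ⟨i', j', hi', hj', he, hc'⟩
            have e1 : i = i' := by
              have := congrArg Prod.fst he
              simp only [] at this
              exact_mod_cast this
            have e2 : j = j' := by
              have := congrArg Prod.snd he
              simp only [] at this
              exact_mod_cast this
            rw [← e1, ← e2] at hc'
            exact hc' hc1
          · rw [pvC_pc friends gifts h j i hjn hi, pvC_pc friends gifts h i j hi hjn]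
            intro hh
            exact hcne (by exact_mod_cast hh.symm)
        refine List.mem_map.2 ⟨((j : Int), (i : Int)),
          List.mem_filter.2 ⟨hpk, pvNotSkip' _ _ _ hns⟩, ?_⟩
        rw [pvCanon_natCast, if_neg (by omega)]
      · have hpk : ((i : Int), (j : Int)) ∈ (pvPcD friends gifts).keys :=
          (pvMem_keys_iff friends gifts h _).2 ⟨i, j, hi, hjn, rfl, hc1⟩
        have hns : ¬ pvSkip friends gifts ((i : Int), (j : Int)) := by
          unfold pvSkip
          push_neg
          dsimp only
          refine ⟨?_, fun hgt => ?_, ?_⟩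
          · intro hh
            have : i = j := by exact_mod_cast hh
            omega
          · exact absurd hgt (by
              have : ¬ ((j : Int) < (i : Int)) := by exact_mod_cast (by omega : ¬ j < i)
              exact this)
          · rw [pvC_pc friends gifts h i j hi hjn, pvC_pc friends gifts h j i hjn hi]
            intro hh
            exact hcne (by exact_mod_cast hh)
        refine List.mem_map.2 ⟨((i : Int), (j : Int)),
          List.mem_filter.2 ⟨hpk, pvNotSkip' _ _ _ hns⟩, ?_⟩
        rw [pvCanon_natCast, if_pos (by omega)]
  case nd =>
    apply hknd.map_on
    intro p hp p' hp' hcan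
    rcases List.mem_filter.1 hp with ⟨hpk, hpb⟩
    rcases List.mem_filter.1 hp' with ⟨hpk', hpb'⟩
    rcases pvKeys_shape friends gifts h p hpk (pvNotSkip _ _ _ hpb) with
      ⟨i, j, hi, hj, rfl, hij, -⟩
    rcases pvKeys_shape friends gifts h p' hpk' (pvNotSkip _ _ _ hpb') with
      ⟨i', j', hi', hj', rfl, hij', -⟩
    rw [pvCanon_natCast, pvCanon_natCast] at hcan
    by_cases h1 : i ≤ j
    · rw [if_pos h1] at hcan
      by_cases h2 : i' ≤ j'
      · rw [if_pos h2] at hcan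
        have e1 : i = i' := congrArg Prod.fst hcan
        have e2 : j = j' := congrArg Prod.snd hcan
        rw [e1, e2]
      · rw [if_neg h2] at hcan
        have e1 : i = j' := congrArg Prod.fst hcan
        have e2 : j = i' := congrArg Prod.snd hcan
        exfalso
        have hsk : pvSkip friends gifts ((i' : Int), (j' : Int)) := by
          unfold pvSkip
          dsimp only
          refine Or.inr (Or.inl ⟨by exact_mod_cast (by omega : j' < i'), ?_⟩)
          rw [PySem.Dict.contains_iff_mem_keys]
          have he : ((j' : Int), (i' : Int)) = ((i : Int), (j : Int)) := by
            rw [← e1, ← e2]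
          rw [he]
          exact hpk
        exact (pvNotSkip _ _ _ hpb') hsk
    · rw [if_neg h1] at hcan
      by_cases h2 : i' ≤ j'
      · rw [if_pos h2] at hcan
        have e1 : j = i' := congrArg Prod.fst hcan
        have e2 : i = j' := congrArg Prod.snd hcan
        exfalso
        have hsk : pvSkip friends gifts ((i : Int), (j : Int)) := by
          unfold pvSkip
          dsimp only
          refine Or.inr (Or.inl ⟨by exact_mod_cast (by omega : j < i), ?_⟩)
          rw [PySem.Dict.contains_iff_mem_keys]
          have he : ((j : Int), (i : Int)) = ((i' : Int), (j' : Int)) := by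
            rw [← e1, ← e2]
          rw [he]
          exact hpk'
        exact (pvNotSkip _ _ _ hpb) hsk
      · rw [if_neg h2] at hcan
        have e1 : j = j' := congrArg Prod.fst hcan
        have e2 : i = i' := congrArg Prod.snd hcan
        rw [e1, e2]

lemma pvSumKeysDB (friends gifts : List String) (h : Pre_solution friends gifts) (k : Nat) :
    (((pvPcD friends gifts).keys).map (fun p => pvDB friends gifts p k)).sum =
      ((pvPairsOf (List.range friends.length)).map (fun q => pvDD friends gifts q k)).sum := by
  rw [pvSumFilter ((pvPcD friends gifts).keys) (fun p => !decide (pvSkip friends gifts p))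
      (fun p => pvDB friends gifts p k)
      (fun p hp hfalse => by
        show pvDB friends gifts p k = 0
        rw [pvDB, if_pos (pvSkipOf _ _ _ hfalse)])]
  rw [List.map_congr_left (f := fun p => pvDB friends gifts p k)
      (g := fun p => pvDD friends gifts (pvCanon p) k)
      (fun p hp => by
        show pvDB friends gifts p k = pvDD friends gifts (pvCanon p) k
        rcases List.mem_filter.1 hp with ⟨-, hns⟩
        rw [pvDB, if_neg (pvNotSkip _ _ _ hns)])]
  rw [show (((pvPcD friends gifts).keys).filter
        (fun p => !decide (pvSkip friends gifts p))).map
          (fun p => pvDD friends gifts (pvCanon p) k) =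
      ((((pvPcD friends gifts).keys).filter
        (fun p => !decide (pvSkip friends gifts p))).map pvCanon).map
          (fun q => pvDD friends gifts q k) from by rw [List.map_map]; rfl]
  rw [List.Perm.sum_eq ((pvPerm_canon friends gifts h).map (fun q => pvDD friends gifts q k))]
  rw [← pvSumFilter (pvPairsOf (List.range friends.length))
      (fun q => !decide (pvC friends gifts q.1 q.2 = pvC friends gifts q.2 q.1))
      (fun q => pvDD friends gifts q k)
      (fun q hq hfalse => pvDD_zero_of_eq friends gifts q k (by simpa using hfalse))]


lemma pvLists_eq (friends gifts : List String) (h : Pre_solution friends gifts) :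
    pvNmA friends gifts = pvNmB friends gifts := by
  have hA := pvNmA_char friends gifts h
  have hB := pvNmB_char friends gifts h
  have hB0 := pvNmB0_char friends gifts
  apply List.ext_getElem (by rw [hA.1, hB.1])
  intro k h1 h2
  have hk : k < friends.length := by rw [hA.1] at h1; exact h1
  rw [← List.getD_eq_getElem (pvNmA friends gifts) 0 h1,
    ← List.getD_eq_getElem (pvNmB friends gifts) 0 h2,
    hA.2 k hk, hB.2 k hk, hB0.2 k hk,
    pvSumKeysDB friends gifts h k, pvRank_as_pair_sum friends gifts k hk,
    ← PySem.List.sum_map_add_int]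
  exact congrArg List.sum (List.map_congr_left (fun q hq => pvDA_split friends gifts q k))


-- ===== VERDICT (by name: the statement is the Claim_ definition above) =====
theorem solution_spec : Claim_equal_solution := by
  intro friends gifts _ hpre
  show solution friends gifts = solution_alt friends gifts
  rw [pvSolutionA_eq friends gifts hpre, pvSolutionB_eq friends gifts hpre,
    pvLists_eq friends gifts hpre]
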